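-- pv_equiv track=rewrite | github.com/AbbyGeek/CodeWars | 7kyu/Vasya and plates.py | count_clean
-- ===== SOURCE A (Python) =====
-- def count_clean(b, p, dishes):
--     washes = 0
--     for x in dishes:
--         if x == 1:
--             if b > 0:
--                 b = b-1
--             else: washes += 1
--         if x == 2:
--             if p > 0:
--                 p -= 1
--             elif b > 0:
--                 b -= 1
--             else: washes += 1
--     return washes
-- ===== SOURCE B (Python) =====
-- def count_clean(b, p, dishes):
--     c1 = c2 = 0
--     for x in dishes:
--         if x == 1:
--             c1 += 1
--         elif x == 2:
--             c2 += 1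
--     need = c1 + max(0, c2 - max(p, 0))
--     return max(0, need - max(b, 0))
-- ===== Notes on version B (the rewrite author's own statement) =====
-- stated objective: simpler
-- what changed: Replaces the per-dish greedy state machine (mutating b, p, washes) with one counting pass over the dishes followed by a closed-form arithmetic formula: washes = max(0, c1 + max(0, c2 - max(p,0)) - max(b,0)).
import Mathlib
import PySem

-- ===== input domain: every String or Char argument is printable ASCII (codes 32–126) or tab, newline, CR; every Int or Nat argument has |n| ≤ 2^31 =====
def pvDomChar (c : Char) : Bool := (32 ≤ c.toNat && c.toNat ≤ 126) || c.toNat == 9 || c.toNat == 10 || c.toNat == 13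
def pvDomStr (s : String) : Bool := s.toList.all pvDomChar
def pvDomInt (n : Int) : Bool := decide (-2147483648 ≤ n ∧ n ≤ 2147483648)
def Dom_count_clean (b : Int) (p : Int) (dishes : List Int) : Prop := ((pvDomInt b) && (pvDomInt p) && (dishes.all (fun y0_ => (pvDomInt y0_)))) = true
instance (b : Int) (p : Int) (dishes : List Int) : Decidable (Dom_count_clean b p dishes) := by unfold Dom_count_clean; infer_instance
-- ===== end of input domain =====

-- B replaces A's per-dish greedy state machine with one counting pass plus a closed-form arithmetic formula (simpler).
-- ===== PORT A =====
-- one iteration of A's loop body over the state (b, p, washes); the two sequential ifs of A stay sequential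
def countCleanStep (st : Int × Int × Int) (x : Int) : Int × Int × Int :=
  let bw := if x = 1 then (if st.1 > 0 then (st.1 - 1, st.2.2) else (st.1, st.2.2 + 1))
            else (st.1, st.2.2)
  if x = 2 then
    (if st.2.1 > 0 then (bw.1, st.2.1 - 1, bw.2)
     else if bw.1 > 0 then (bw.1 - 1, st.2.1, bw.2)
     else (bw.1, st.2.1, bw.2 + 1))
  else (bw.1, st.2.1, bw.2)

def count_clean (b : Int) (p : Int) (dishes : List Int) : Int :=
  (dishes.foldl countCleanStep (b, p, 0)).2.2

-- ===== PORT B =====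
-- counting pass: acc = (c1, c2)
def countClean12 (acc : Int × Int) (x : Int) : Int × Int :=
  if x = 1 then (acc.1 + 1, acc.2)
  else if x = 2 then (acc.1, acc.2 + 1)
  else acc

def count_clean_alt (b : Int) (p : Int) (dishes : List Int) : Int :=
  let c := dishes.foldl countClean12 (0, 0)
  let need := c.1 + max 0 (c.2 - max p 0)
  max 0 (need - max b 0)

-- ===== PRECONDITION & SPEC =====
def Spec_count_clean (b : Int) (p : Int) (dishes : List Int) (out : Int) : Prop := out = count_clean_alt b p dishes
instance (b : Int) (p : Int) (dishes : List Int) (out : Int) : Decidable (Spec_count_clean b p dishes out) := by unfold Spec_count_clean; infer_instance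

-- ===== CLAIM (what is proved, stated in full; the proofs are below) =====
def Claim_equal_count_clean : Prop := ∀ (b : Int) (p : Int) (dishes : List Int), Dom_count_clean b p dishes → Spec_count_clean b p dishes (count_clean b p dishes)

-- ===== LEMMAS AND PROOFS =====
-- closed-form counts of 1s and 2s, used only by the proofs
def cnt1 : List Int → Int
  | [] => 0
  | x :: t => (if x = 1 then 1 else 0) + cnt1 t

def cnt2 : List Int → Int
  | [] => 0
  | x :: t => (if x = 2 then 1 else 0) + cnt2 t

-- B's counting fold computes (c1 + cnt1, c2 + cnt2)
theorem foldl_count12 (l : List Int) : ∀ (c1 c2 : Int),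
    l.foldl countClean12 (c1, c2) = (c1 + cnt1 l, c2 + cnt2 l) := by
  induction l with
  | nil => intro c1 c2; simp [cnt1, cnt2]
  | cons x t ih =>
    intro c1 c2
    simp only [List.foldl_cons, countClean12, cnt1, cnt2]
    split_ifs <;> rw [ih] <;> simp only [Prod.mk.injEq] <;> omega

theorem cnt1_nonneg (l : List Int) : 0 ≤ cnt1 l := by
  induction l with
  | nil => simp [cnt1]
  | cons x t ih => simp only [cnt1]; split_ifs <;> omega

theorem cnt2_nonneg (l : List Int) : 0 ≤ cnt2 l := by
  induction l with
  | nil => simp [cnt2]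
  | cons x t ih => simp only [cnt2]; split_ifs <;> omega

-- A's greedy loop, characterised in closed form
theorem foldl_step_closed (l : List Int) : ∀ (b p w : Int),
    (l.foldl countCleanStep (b, p, w)).2.2 =
      w + max 0 (cnt1 l + max 0 (cnt2 l - max p 0) - max b 0) := by
  induction l with
  | nil => intro b p w; simp [cnt1, cnt2]
  | cons x t ih =>
    intro b p w
    simp only [List.foldl_cons, countCleanStep, cnt1, cnt2]
    have h1 := cnt1_nonneg t
    have h2 := cnt2_nonneg t
    split_ifs <;> simp only [] <;> rw [ih] <;> omega

-- ===== VERDICT (by name: the statement is the Claim_ definition above) =====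
theorem count_clean_spec : Claim_equal_count_clean := by
  intro b p dishes _
  unfold Spec_count_clean
  simp only [count_clean, count_clean_alt, foldl_count12, foldl_step_closed]
  omega
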